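-- pv_equiv track=rewrite | github.com/maticklopcic/ieps_project | Assignment2/RoadRunner.py | pretty_format
-- ===== SOURCE A (Python) =====
-- def pretty_format(wrapper, indent=0):
--     # Improved HTML formatting for readability
--     lines = []
--     tokens = wrapper.split()
--     i = 0
--     indent_step = 4  # Set the step for each level of indentation
--     open_tags = []  # Track open tags to manage indentation
--     special_tags = ['<a>', '<b>', '<title>', '<span>', '<select>'] # List of tags to trigger new lines
--
--     while i < len(tokens):
--         if tokens[i].startswith('<') and not tokens[i].startswith('</'):
--             tag_content = [tokens[i]]  # Opening tag
--             i += 1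
--             while i < len(tokens) and not tokens[i].startswith('<'):
--                 if tokens[i].startswith('</'):
--                     tag_content.append(tokens[i])  # Include the closing tag in content
--                     i += 1
--                     break
--                 tag_content.append(tokens[i])  # Content between tags
--                 i += 1
--
--             # Check if current tag is a special tag
--             if tag_content[0] in special_tags:
--                 lines.append('')  # Add a newline before the tag if it's a special tag
--                 lines.append(' ' * indent + ' '.join(tag_content))
--                 lines.append('')  # Add a newline after the special tag
--             else:
--                 # Add content to the last line or start a new one if lines is empty
--                 if lines:
--                     lines[-1] += ' ' + ' '.join(tag_content)
--                 else:
--                     lines.append(' ' * indent + ' '.join(tag_content))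
--         else:
--             # Handle free floating text nodes or misplaced tokens
--             current_line = ' ' * indent + tokens[i]
--             if lines:
--                 lines[-1] += ' ' + current_line
--             else:
--                 lines.append(current_line)
--             i += 1
--
--     return '\n'.join(lines)
-- ===== SOURCE B (Python) =====
-- def pretty_format(wrapper, indent=0):
--     special = ('<a>', '<b>', '<title>', '<span>', '<select>')
--     # pass 1: group the tokens into chunks: open-tag groups and floating tokens
--     chunks = []
--     collecting = False
--     for tok in wrapper.split():
--         if tok.startswith('<') and not tok.startswith('</'):
--             chunks.append(['open', [tok]])
--             collecting = True
--         elif tok.startswith('<'):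
--             chunks.append(['float', tok])
--             collecting = False
--         elif collecting:
--             chunks[-1][1].append(tok)
--         else:
--             chunks.append(['float', tok])
--             collecting = False
--     # pass 2: render the chunk list into one output string
--     out = None  # None = no line emitted yet
--     for kind, val in chunks:
--         if kind == 'open':
--             text = ' '.join(val)
--             if val[0] in special:
--                 out = ('' if out is None else out + '\n') + '\n' + ' ' * indent + text + '\n'
--             elif out is None:
--                 out = ' ' * indent + text
--             else:
--                 out += ' ' + text
--         else:
--             piece = ' ' * indent + val
--             out = piece if out is None else out + ' ' + piece
--     return '' if out is None else out
-- ===== Notes on version B (the rewrite author's own statement) =====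
-- stated objective: alternative
-- what changed: B replaces A's index-driven while loop with a nested token-consuming while and a mutable lines list by two separate passes: a single fold over the tokens that groups them into tagged chunks (open-tag group / floating token) using a collecting flag, then a fold over the chunks that renders directly into one output string accumulator instead of a list of lines joined at the end.
import Mathlib
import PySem

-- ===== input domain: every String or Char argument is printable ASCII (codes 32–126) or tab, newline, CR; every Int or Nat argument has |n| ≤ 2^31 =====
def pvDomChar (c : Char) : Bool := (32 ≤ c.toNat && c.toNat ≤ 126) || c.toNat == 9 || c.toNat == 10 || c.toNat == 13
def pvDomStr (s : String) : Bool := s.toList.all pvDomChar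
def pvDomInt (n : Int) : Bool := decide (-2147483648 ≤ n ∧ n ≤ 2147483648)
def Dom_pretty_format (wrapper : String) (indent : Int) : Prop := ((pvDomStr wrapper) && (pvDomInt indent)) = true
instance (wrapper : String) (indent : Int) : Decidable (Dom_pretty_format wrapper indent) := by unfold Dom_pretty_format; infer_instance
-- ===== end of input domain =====

-- B re-decomposes A (index-driven while with a nested token-consuming while building a lines
-- list) into two folds: one grouping tokens into tagged chunks, one rendering the chunks into a
-- single string accumulator; same output, same O(n) cost (objective: alternative).

-- ===== PORT A =====
def pvSpecialTags : List (List Char) :=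
  [String.toList "<a>", String.toList "<b>", String.toList "<title>",
   String.toList "<span>", String.toList "<select>"]

-- A's inner while: collect content tokens after an opening tag (incl. its unreachable '</' branch)
def pvA_inner : List (List Char) → List (List Char) → List (List Char) × List (List Char)
  | [], tc => (tc, [])
  | t :: ts, tc =>
    if PySem.Chars.startswith t ['<'] then (tc, t :: ts)
    else if PySem.Chars.startswith t ['<', '/'] then (tc ++ [t], ts)
    else pvA_inner ts (tc ++ [t])

theorem pvA_inner_len : ∀ (ts tc : List (List Char)), (pvA_inner ts tc).2.length ≤ ts.length := by
  intro ts
  induction ts with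
  | nil => intro tc; simp [pvA_inner]
  | cons t ts ih =>
    intro tc
    simp only [pvA_inner]
    split
    · simp
    · split
      · simp
      · exact le_trans (ih _) (by simp)

-- A's outer while over the remaining tokens, carrying the lines list
def pvA_loop (indent : Int) (lines : List (List Char)) :
    List (List Char) → List (List Char)
  | [] => lines
  | t :: ts =>
    if PySem.Chars.startswith t ['<'] && !(PySem.Chars.startswith t ['<', '/']) then
      let r := pvA_inner ts [t]
      let lines' :=
        if r.1.headD [] ∈ pvSpecialTags then
          lines ++ [[], (PySem.List.pyRepeat [' '] indent) ++ PySem.Chars.join [' '] r.1, []]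
        else if !lines.isEmpty then
          lines.dropLast ++ [lines.getLast! ++ ' ' :: PySem.Chars.join [' '] r.1]
        else
          [(PySem.List.pyRepeat [' '] indent) ++ PySem.Chars.join [' '] r.1]
      pvA_loop indent lines' r.2
    else
      let cur := (PySem.List.pyRepeat [' '] indent) ++ t
      let lines' :=
        if !lines.isEmpty then lines.dropLast ++ [lines.getLast! ++ ' ' :: cur]
        else [cur]
      pvA_loop indent lines' ts
termination_by ts => ts.length
decreasing_by
  · exact Nat.lt_succ_of_le (pvA_inner_len ts [t])
  · simp

def pretty_format (wrapper : String) (indent : Int) : String :=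
  let tokens := PySem.Chars.split₀ wrapper.toList
  String.mk (PySem.Chars.join ['\n'] (pvA_loop indent [] tokens))

-- ===== PORT B =====
inductive PvChunk
  | opn : List (List Char) → PvChunk
  | flt : List Char → PvChunk
deriving DecidableEq, Repr, Inhabited

def pvAppendTok (c : PvChunk) (t : List Char) : PvChunk :=
  match c with
  | .opn l => .opn (l ++ [t])
  | .flt x => .flt x

-- pass 1: one step of the chunk-grouping fold (state: chunks so far, collecting flag)
def pvB_step (st : List PvChunk × Bool) (t : List Char) : List PvChunk × Bool :=
  if PySem.Chars.startswith t ['<'] && !(PySem.Chars.startswith t ['<', '/']) then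
    (st.1 ++ [.opn [t]], true)
  else if PySem.Chars.startswith t ['<'] then
    (st.1 ++ [.flt t], false)
  else if st.2 then
    (st.1.dropLast ++ [pvAppendTok st.1.getLast! t], true)
  else
    (st.1 ++ [.flt t], false)

-- pass 2: one step of the rendering fold (accumulator: none = no line emitted yet)
def pvB_emit (indent : Int) (out : Option (List Char)) (c : PvChunk) : Option (List Char) :=
  match c with
  | .opn tc =>
    let text := PySem.Chars.join [' '] tc
    if tc.headD [] ∈ pvSpecialTags then
      some ((match out with | none => [] | some s => s ++ ['\n']) ++ '\n' :: (((PySem.List.pyRepeat [' '] indent) ++ text) ++ ['\n']))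
    else
      match out with
      | none => some ((PySem.List.pyRepeat [' '] indent) ++ text)
      | some s => some (s ++ ' ' :: text)
  | .flt t =>
    let piece := (PySem.List.pyRepeat [' '] indent) ++ t
    match out with
    | none => some piece
    | some s => some (s ++ ' ' :: piece)

def pretty_format_alt (wrapper : String) (indent : Int) : String :=
  let chunks := ((PySem.Chars.split₀ wrapper.toList).foldl pvB_step ([], false)).1
  String.mk ((chunks.foldl (pvB_emit indent) none).getD [])

-- ===== PRECONDITION & SPEC =====
def Spec_pretty_format (wrapper : String) (indent : Int) (out : String) : Prop := out = pretty_format_alt wrapper indent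
instance (wrapper : String) (indent : Int) (out : String) : Decidable (Spec_pretty_format wrapper indent out) := by unfold Spec_pretty_format; infer_instance

-- ===== CLAIM (what is proved, stated in full; the proofs are below) =====
def Claim_equal_pretty_format : Prop := ∀ (wrapper : String) (indent : Int), Dom_pretty_format wrapper indent → Spec_pretty_format wrapper indent (pretty_format wrapper indent)

-- ===== LEMMAS AND PROOFS =====

-- content tokens (do not start with '<') and opening tags
def pvCont (t : List Char) : Bool := !(PySem.Chars.startswith t ['<'])
def pvIsOpen (t : List Char) : Bool :=
  PySem.Chars.startswith t ['<'] && !(PySem.Chars.startswith t ['<', '/'])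

-- the chunk decomposition both programs compute
def pvChunksOf : List (List Char) → List PvChunk
  | [] => []
  | t :: ts =>
    if pvIsOpen t then
      .opn (t :: ts.takeWhile pvCont) :: pvChunksOf (ts.dropWhile pvCont)
    else
      .flt t :: pvChunksOf ts
termination_by l => l.length
decreasing_by
  · exact Nat.lt_succ_of_le (List.length_dropWhile_le _ _)
  · simp

-- A's per-chunk rendering on the lines list
def pvA_emitC (indent : Int) (lines : List (List Char)) (c : PvChunk) : List (List Char) :=
  match c with
  | .opn tc =>
    if tc.headD [] ∈ pvSpecialTags then
      lines ++ [[], (PySem.List.pyRepeat [' '] indent) ++ PySem.Chars.join [' '] tc, []]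
    else if !lines.isEmpty then
      lines.dropLast ++ [lines.getLast! ++ ' ' :: PySem.Chars.join [' '] tc]
    else
      [(PySem.List.pyRepeat [' '] indent) ++ PySem.Chars.join [' '] tc]
  | .flt t =>
    if !lines.isEmpty then lines.dropLast ++ [lines.getLast! ++ ' ' :: ((PySem.List.pyRepeat [' '] indent) ++ t)]
    else [(PySem.List.pyRepeat [' '] indent) ++ t]

theorem pvChunksOf_cons (t : List Char) (ts : List (List Char)) :
    pvChunksOf (t :: ts) =
      (if pvIsOpen t then
        PvChunk.opn (t :: ts.takeWhile pvCont) :: pvChunksOf (ts.dropWhile pvCont)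
      else PvChunk.flt t :: pvChunksOf ts) := by
  rw [pvChunksOf]

theorem pv_startswith_slash (t : List Char)
    (h : PySem.Chars.startswith t ['<', '/'] = true) :
    PySem.Chars.startswith t ['<'] = true := by
  rw [PySem.Chars.startswith_iff] at h ⊢
  exact List.IsPrefix.trans ⟨['/'], rfl⟩ h

theorem pvA_inner_eq : ∀ (ts tc : List (List Char)),
    pvA_inner ts tc = (tc ++ ts.takeWhile pvCont, ts.dropWhile pvCont) := by
  intro ts
  induction ts with
  | nil => intro tc; simp [pvA_inner]
  | cons t ts ih =>
    intro tc
    simp only [pvA_inner]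
    by_cases h : PySem.Chars.startswith t ['<'] = true
    · rw [if_pos h]
      have hc : pvCont t = false := by simp [pvCont, h]
      simp [List.takeWhile_cons, List.dropWhile_cons, hc]
    · rw [if_neg h, if_neg (fun hh => h (pv_startswith_slash t hh)), ih]
      have hc : pvCont t = true := by simp [pvCont, Bool.eq_false_iff.mpr h]
      simp [List.takeWhile_cons, List.dropWhile_cons, hc]

theorem pvA_loop_eq (indent : Int) : ∀ (n : Nat) (ts : List (List Char)), ts.length ≤ n →
    ∀ lines, pvA_loop indent lines ts = (pvChunksOf ts).foldl (pvA_emitC indent) lines := by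
  intro n
  induction n with
  | zero =>
    intro ts h lines
    have hts : ts = [] := List.eq_nil_of_length_eq_zero (Nat.le_zero.mp h)
    subst hts
    simp [pvA_loop, pvChunksOf]
  | succ n ih =>
    intro ts h lines
    cases ts with
    | nil => simp [pvA_loop, pvChunksOf]
    | cons t ts' =>
      rw [pvA_loop, pvChunksOf]
      by_cases ho : (PySem.Chars.startswith t ['<'] && !(PySem.Chars.startswith t ['<', '/'])) = true
      · rw [if_pos ho, if_pos (show pvIsOpen t = true from ho)]
        rw [pvA_inner_eq ts' [t]]
        rw [ih _ (le_trans (List.length_dropWhile_le _ _) (Nat.le_of_succ_le_succ h))]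
        rw [List.foldl_cons]
        rfl
      · rw [if_neg ho, if_neg (show ¬ pvIsOpen t = true from ho)]
        rw [ih _ (Nat.le_of_succ_le_succ h)]
        rw [List.foldl_cons]
        rfl

theorem pvB_pass1 : ∀ ts : List (List Char),
    (∀ cs, (ts.foldl pvB_step (cs, false)).1 = cs ++ pvChunksOf ts) ∧
    (∀ cs acc, (ts.foldl pvB_step (cs ++ [PvChunk.opn acc], true)).1 =
      cs ++ .opn (acc ++ ts.takeWhile pvCont) :: pvChunksOf (ts.dropWhile pvCont)) := by
  intro ts
  induction ts with
  | nil => constructor <;> intros <;> simp [pvChunksOf]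
  | cons t ts ih =>
    obtain ⟨ih1, ih2⟩ := ih
    constructor
    · intro cs
      rw [List.foldl_cons, pvChunksOf]
      by_cases ho : (PySem.Chars.startswith t ['<'] && !(PySem.Chars.startswith t ['<', '/'])) = true
      · rw [if_pos (show pvIsOpen t = true from ho)]
        show (List.foldl pvB_step (pvB_step (cs, false) t) ts).1 = _
        rw [show pvB_step (cs, false) t = (cs ++ [PvChunk.opn [t]], true) from by
          simp only [pvB_step, if_pos ho]]
        rw [ih2 cs [t]]
        simp
      · rw [if_neg (show ¬ pvIsOpen t = true from ho)]
        show (List.foldl pvB_step (pvB_step (cs, false) t) ts).1 = _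
        rw [show pvB_step (cs, false) t = (cs ++ [PvChunk.flt t], false) from by
          simp only [pvB_step, if_neg ho]
          split <;> rfl]
        rw [ih1 (cs ++ [PvChunk.flt t])]
        simp
    · intro cs acc
      rw [List.foldl_cons]
      by_cases ho : (PySem.Chars.startswith t ['<'] && !(PySem.Chars.startswith t ['<', '/'])) = true
      · have hc : pvCont t = false := by
          have := (Bool.and_eq_true _ _).mp ho
          simp [pvCont, this.1]
        rw [show pvB_step (cs ++ [PvChunk.opn acc], true) t = ((cs ++ [PvChunk.opn acc]) ++ [PvChunk.opn [t]], true) from by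
          simp only [pvB_step, if_pos ho]]
        rw [ih2 (cs ++ [PvChunk.opn acc]) [t]]
        rw [List.takeWhile_cons, List.dropWhile_cons, hc]
        simp only [Bool.false_eq_true, if_false]
        rw [pvChunksOf_cons, if_pos (show pvIsOpen t = true from ho)]
        simp
      · by_cases hlt : PySem.Chars.startswith t ['<'] = true
        · have hc : pvCont t = false := by simp [pvCont, hlt]
          rw [show pvB_step (cs ++ [PvChunk.opn acc], true) t = ((cs ++ [PvChunk.opn acc]) ++ [PvChunk.flt t], false) from by
            simp only [pvB_step, if_neg ho, if_pos hlt]]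
          rw [ih1 ((cs ++ [PvChunk.opn acc]) ++ [PvChunk.flt t])]
          rw [List.takeWhile_cons, List.dropWhile_cons, hc]
          simp only [Bool.false_eq_true, if_false]
          rw [pvChunksOf_cons, if_neg (show ¬ pvIsOpen t = true from ho)]
          simp
        · have hc : pvCont t = true := by simp [pvCont, Bool.eq_false_iff.mpr hlt]
          rw [show pvB_step (cs ++ [PvChunk.opn acc], true) t = (cs ++ [PvChunk.opn (acc ++ [t])], true) from by
            simp only [pvB_step, if_neg ho, if_neg hlt, if_pos rfl]
            simp [pvAppendTok]]
          rw [ih2 cs (acc ++ [t])]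
          rw [List.takeWhile_cons, List.dropWhile_cons, hc]
          simp

theorem pv_join_append (sep : List Char) (xs ys : List (List Char))
    (h1 : xs ≠ []) (h2 : ys ≠ []) :
    PySem.Chars.join sep (xs ++ ys) =
      PySem.Chars.join sep xs ++ sep ++ PySem.Chars.join sep ys := by
  induction xs with
  | nil => exact absurd rfl h1
  | cons x xs ih =>
    cases xs with
    | nil =>
      cases ys with
      | nil => exact absurd rfl h2
      | cons y ys' =>
        rw [List.singleton_append, PySem.Chars.join_cons_cons, PySem.Chars.join_singleton]
    | cons x' xs' =>
      have e : (x :: x' :: xs') ++ ys = x :: x' :: (xs' ++ ys) := by simp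
      have ih' := ih (by simp)
      rw [List.cons_append] at ih'
      rw [e, PySem.Chars.join_cons_cons, ih', PySem.Chars.join_cons_cons]
      simp only [List.append_assoc]

theorem pv_join_modify_last (l : List (List Char)) (y : List Char) (h : l ≠ []) :
    PySem.Chars.join ['\n'] (l.dropLast ++ [l.getLast! ++ y]) =
      PySem.Chars.join ['\n'] l ++ y := by
  obtain ⟨l', a, rfl⟩ := (List.eq_nil_or_concat l).resolve_left h
  simp only [List.concat_eq_append]
  rw [List.dropLast_concat]
  rw [show (l' ++ [a]).getLast! = a from by simp]
  cases l' with
  | nil => rw [List.nil_append, List.nil_append, PySem.Chars.join_singleton, PySem.Chars.join_singleton]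
  | cons b bs =>
    rw [pv_join_append _ _ _ (by simp) (by simp), pv_join_append _ _ _ (by simp) (by simp)]
    rw [PySem.Chars.join_singleton, PySem.Chars.join_singleton]
    simp [List.append_assoc]

def pvRel (out : Option (List Char)) (lines : List (List Char)) : Prop :=
  out = if lines.isEmpty then none else some (PySem.Chars.join ['\n'] lines)

theorem pvRel_step (indent : Int) (out : Option (List Char)) (lines : List (List Char))
    (h : pvRel out lines) (c : PvChunk) :
    pvRel (pvB_emit indent out c) (pvA_emitC indent lines c) := by
  unfold pvRel at h ⊢
  cases c with
  | opn tc =>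
    by_cases hs : tc.headD [] ∈ pvSpecialTags
    · simp only [pvB_emit, pvA_emitC, if_pos hs]
      cases lines with
      | nil =>
        simp only [List.isEmpty_nil, if_pos rfl] at h
        subst h
        simp [PySem.Chars.join, List.intercalate]
      | cons L Ls =>
        simp only [List.isEmpty_cons, Bool.false_eq_true, if_false] at h
        subst h
        split_ifs with hif
        · exfalso
          rw [List.cons_append] at hif
          simp at hif
        · rw [pv_join_append ['\n'] (L :: Ls)
            [[], (PySem.List.pyRepeat [' '] indent) ++ PySem.Chars.join [' '] tc, []] (by simp) (by simp)]
          rw [PySem.Chars.join_cons_cons, PySem.Chars.join_cons_cons,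
            PySem.Chars.join_singleton]
          simp [List.append_assoc]
    · simp only [pvB_emit, pvA_emitC, if_neg hs]
      cases lines with
      | nil =>
        simp only [List.isEmpty_nil, if_pos rfl] at h
        subst h
        simp [PySem.Chars.join, List.intercalate]
      | cons L Ls =>
        simp only [List.isEmpty_cons, Bool.false_eq_true, if_false] at h
        subst h
        rw [if_pos (show (!(L :: Ls).isEmpty) = true from by simp)]
        split_ifs with hif
        · exfalso
          simp at hif
        · rw [pv_join_modify_last (L :: Ls) (' ' :: PySem.Chars.join [' '] tc) (by simp)]
  | flt t =>
    simp only [pvB_emit, pvA_emitC]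
    cases lines with
    | nil =>
      simp only [List.isEmpty_nil, if_pos rfl] at h
      subst h
      simp [PySem.Chars.join, List.intercalate]
    | cons L Ls =>
      simp only [List.isEmpty_cons, Bool.false_eq_true, if_false] at h
      subst h
      rw [if_pos (show (!(L :: Ls).isEmpty) = true from by simp)]
      split_ifs with hif
      · exfalso
        simp at hif
      · rw [pv_join_modify_last (L :: Ls) (' ' :: ((PySem.List.pyRepeat [' '] indent) ++ t)) (by simp)]

theorem pvRel_fold (indent : Int) : ∀ (cs : List PvChunk) (out : Option (List Char))
    (lines : List (List Char)), pvRel out lines →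
    pvRel (cs.foldl (pvB_emit indent) out) (cs.foldl (pvA_emitC indent) lines) := by
  intro cs
  induction cs with
  | nil => intro out lines h; exact h
  | cons c cs ih => intro out lines h; exact ih _ _ (pvRel_step indent out lines h c)

-- ===== VERDICT (by name: the statement is the Claim_ definition above) =====
theorem pretty_format_spec : Claim_equal_pretty_format := by
  intro wrapper indent _
  unfold Spec_pretty_format pretty_format pretty_format_alt
  have hA := pvA_loop_eq indent
    (PySem.Chars.split₀ wrapper.toList).length (PySem.Chars.split₀ wrapper.toList) le_rfl []
  have hB := (pvB_pass1 (PySem.Chars.split₀ wrapper.toList)).1 []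
  have hR := pvRel_fold indent
    (pvChunksOf (PySem.Chars.split₀ wrapper.toList)) none [] (by simp [pvRel])
  unfold pvRel at hR
  simp only [hA, hB, List.nil_append]
  rw [hR]
  cases h : (List.foldl (pvA_emitC indent) []
      (pvChunksOf (PySem.Chars.split₀ wrapper.toList))).isEmpty with
  | true =>
    rw [if_pos rfl, List.isEmpty_iff.mp h]
    rfl
  | false =>
    rw [if_neg (by simp), Option.getD_some]
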